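-- pv_equiv track=rewrite | github.com/ldfha/lidar_lane_detector | src/lanedet.py | extract_road_line
-- ===== SOURCE A (Python) =====
-- def extract_road_line(points):
--     left_points = []
--     right_points = []
--
--     for point in points:
--         if point[1] > 0:
--             right_points.append(point)
--         else:
--             left_points.append(point)
--
--     # x축 기준으로 정렬하여 차선이 도로 방향을 따라 정렬
--     left_points = sorted(left_points, key=lambda p: p[0])
--     right_points = sorted(right_points, key=lambda p: p[0])
--
--     return left_points, right_points
-- ===== SOURCE B (Python) =====
-- def _insort_x(lst, point):
--     # insert point into lst (kept sorted by x), after any equal x (stable)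
--     i = 0
--     while i < len(lst) and lst[i][0] <= point[0]:
--         i += 1
--     lst.insert(i, point)
--
-- def extract_road_line(points):
--     left_points = []
--     right_points = []
--     # single pass: maintain each side already sorted by x via ordered insertion
--     for point in points:
--         if point[1] > 0:
--             _insort_x(right_points, point)
--         else:
--             _insort_x(left_points, point)
--     return left_points, right_points
-- ===== Notes on version B (the rewrite author's own statement) =====
-- stated objective: alternative
-- what changed: B never calls sort: it makes one pass over the input, maintaining each side as an already-x-sorted list by ordered insertion (insert after equal keys, so tie order matches A's stable sort), instead of A's partition-then-sort-each-half.
import Mathlib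
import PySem

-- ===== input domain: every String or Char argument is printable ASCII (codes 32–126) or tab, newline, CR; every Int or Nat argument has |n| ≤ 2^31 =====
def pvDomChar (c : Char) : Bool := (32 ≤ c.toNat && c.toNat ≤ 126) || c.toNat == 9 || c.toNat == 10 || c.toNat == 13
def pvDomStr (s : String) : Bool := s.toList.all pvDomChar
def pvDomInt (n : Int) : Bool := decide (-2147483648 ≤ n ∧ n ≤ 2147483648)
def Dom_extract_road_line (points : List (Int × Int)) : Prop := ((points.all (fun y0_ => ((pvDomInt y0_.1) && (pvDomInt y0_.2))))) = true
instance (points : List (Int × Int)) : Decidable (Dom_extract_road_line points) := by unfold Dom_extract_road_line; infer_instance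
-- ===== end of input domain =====

-- B replaces A's partition-then-two-sorts by one pass that keeps each side sorted via ordered insertion (alternative decomposition, not faster).


-- ===== PORT A =====
def extract_road_line (points : List (Int × Int)) : (List (Int × Int)) × (List (Int × Int)) :=
  let lr := points.foldl
    (fun (acc : List (Int × Int) × List (Int × Int)) point =>
      if point.2 > 0 then (acc.1, acc.2 ++ [point]) else (acc.1 ++ [point], acc.2))
    ([], [])
  (PySem.List.sorted lr.1 (fun p => p.1) false, PySem.List.sorted lr.2 (fun p => p.1) false)

-- ===== PORT B =====
-- the while-loop + list.insert of Source B's _insort_x: skip elements with x ≤ point's x, insert there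
def insortX : List (Int × Int) → (Int × Int) → List (Int × Int)
  | [], point => [point]
  | y :: t, point => if y.1 ≤ point.1 then y :: insortX t point else point :: y :: t

def extract_road_line_alt (points : List (Int × Int)) : (List (Int × Int)) × (List (Int × Int)) :=
  points.foldl
    (fun (acc : List (Int × Int) × List (Int × Int)) point =>
      if point.2 > 0 then (acc.1, insortX acc.2 point) else (insortX acc.1 point, acc.2))
    ([], [])

-- ===== PRECONDITION & SPEC =====
def Spec_extract_road_line (points : List (Int × Int)) (out : (List (Int × Int)) × (List (Int × Int))) : Prop := out = extract_road_line_alt points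
instance (points : List (Int × Int)) (out : (List (Int × Int)) × (List (Int × Int))) : Decidable (Spec_extract_road_line points out) := by unfold Spec_extract_road_line; infer_instance

-- ===== CLAIM =====
def Claim_equal_extract_road_line : Prop := ∀ (points : List (Int × Int)), Dom_extract_road_line points → Spec_extract_road_line points (extract_road_line points)

-- ===== LEMMAS AND PROOFS =====

-- A's partition fold unfolds to two filters
theorem part_foldl (xs : List (Int × Int)) (l r : List (Int × Int)) :
    xs.foldl
      (fun (acc : List (Int × Int) × List (Int × Int)) point =>
        if point.2 > 0 then (acc.1, acc.2 ++ [point]) else (acc.1 ++ [point], acc.2))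
      (l, r)
    = (l ++ xs.filter (fun q => !decide (q.2 > 0)), r ++ xs.filter (fun q => decide (q.2 > 0))) := by
  induction xs generalizing l r with
  | nil => simp
  | cons x t ih =>
    by_cases hx : x.2 > 0 <;> simp [List.foldl, hx, ih]

-- B's insortX is exactly stable insertion by the x key
theorem insortX_eq_insertBy (lst : List (Int × Int)) (p : Int × Int) :
    insortX lst p = PySem.List.insertBy (fun a b => decide (a.1 < b.1)) p lst := by
  induction lst with
  | nil => simp [insortX, PySem.List.insertBy]
  | cons y t ih =>
    by_cases h : y.1 ≤ p.1
    · have h' : ¬ p.1 < y.1 := by omega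
      simp [insortX, PySem.List.insertBy, h, h', ih]
    · have h' : p.1 < y.1 := by omega
      simp [insortX, PySem.List.insertBy, h, h']

-- B's pair fold splits into an insertion fold over each y-sign class
theorem alt_foldl (xs : List (Int × Int)) (l r : List (Int × Int)) :
    xs.foldl
      (fun (acc : List (Int × Int) × List (Int × Int)) point =>
        if point.2 > 0 then (acc.1, insortX acc.2 point) else (insortX acc.1 point, acc.2))
      (l, r)
    = ((xs.filter (fun q => !decide (q.2 > 0))).foldl insortX l,
       (xs.filter (fun q => decide (q.2 > 0))).foldl insortX r) := by
  induction xs generalizing l r with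
  | nil => simp
  | cons x t ih =>
    by_cases hx : x.2 > 0 <;> simp [List.foldl, hx, ih]

-- a stable x-sort is the insortX insertion fold
theorem sorted_eq_foldl_insortX (xs : List (Int × Int)) :
    PySem.List.sorted xs (fun p => p.1) false = xs.foldl insortX [] := by
  rw [PySem.List.sorted_eq_foldl_insertBy]
  have : ∀ (acc : List (Int × Int)),
      xs.foldl (fun acc x => PySem.List.insertBy (fun a b => decide (a.1 < b.1)) x acc) acc
      = xs.foldl insortX acc := by
    induction xs with
    | nil => intro acc; rfl
    | cons x t ih => intro acc; simp [List.foldl, insortX_eq_insertBy, ih]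
  exact this []

-- ===== VERDICT =====
theorem extract_road_line_spec : Claim_equal_extract_road_line := by
  intro points _
  unfold Spec_extract_road_line extract_road_line extract_road_line_alt
  rw [part_foldl, alt_foldl]
  simp [sorted_eq_foldl_insortX]
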